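-- pv_equiv track=rewrite | github.com/MaX-Lo/ProjectEuler | 052_permuted_multiples.py | get_permutation_list
-- ===== SOURCE A (Python) =====
-- import itertools
--
-- def get_permutation_list(num):
--     digits = [c for c in str(num)]
--     permutations = list(itertools.permutations(digits))
--
--     int_list = []
--     for ele in permutations:
--         num_str = ''
--         for digit in ele:
--             num_str += digit
--         int_list.append(int(num_str))
--     return int_list
-- ===== SOURCE B (Python) =====
-- def get_permutation_list(num):
--     memo = {'': ['']}
--
--     def perms(rest):
--         if rest not in memo:
--             memo[rest] = [rest[i] + t
--                           for i in range(len(rest))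
--                           for t in perms(rest[:i] + rest[i + 1:])]
--         return memo[rest]
--
--     s = str(num)
--     return [int(s[i] + t)
--             for i in range(len(s))
--             for t in perms(s[:i] + s[i + 1:])]
-- ===== Notes on version B (the rewrite author's own statement) =====
-- stated objective: faster
-- what changed: Replaces itertools.permutations plus a per-character string-joining pass with a recursive index-selection generator over the digit string, memoized on the remaining-digits string so shared sub-permutation lists are built once, and a single int() comprehension.
import Mathlib
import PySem

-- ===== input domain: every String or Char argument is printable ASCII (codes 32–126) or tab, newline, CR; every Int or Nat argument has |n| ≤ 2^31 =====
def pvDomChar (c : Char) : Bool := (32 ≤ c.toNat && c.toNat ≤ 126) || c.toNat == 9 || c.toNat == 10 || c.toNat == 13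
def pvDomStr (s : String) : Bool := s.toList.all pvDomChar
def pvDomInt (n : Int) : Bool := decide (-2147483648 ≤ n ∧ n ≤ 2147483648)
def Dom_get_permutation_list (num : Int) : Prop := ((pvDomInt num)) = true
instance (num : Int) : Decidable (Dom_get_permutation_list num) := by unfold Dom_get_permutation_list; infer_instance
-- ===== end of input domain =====

-- B replaces A's itertools.permutations call + per-character joining pass by a
-- recursive index-selection generator over the digit string (memoized on the
-- remaining-digits string in Python; the memo only caches calls and never changes a
-- value, so it is ported as the bare recursion) and one int() comprehension.

-- int(num_str) for both ports; both Pythons only reach it on digit strings (Pre_),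
-- where ofChars? is some; the getD 0 default is never the claimed value.
def pyIntOf (cs : List Char) : Int := (PySem.Int.ofChars? cs).getD 0

-- ===== PORT A =====
-- itertools.permutations ported literally: at each level pick position i (in index
-- order), recurse on the remaining characters in order; fuel = list length.
def pvPicks : List Char → List (Char × List Char)
  | [] => []
  | c :: cs => (c, cs) :: (pvPicks cs).map (fun p => (p.1, c :: p.2))

def pvPerms : Nat → List Char → List (List Char)
  | _, [] => [[]]
  | 0, _ => [[]]
  | n + 1, l => (pvPicks l).flatMap (fun p => (pvPerms n p.2).map (p.1 :: ·))

def get_permutation_list (num : Int) : List Int :=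
  let digits := PySem.Int.toChars num
  let permutations := pvPerms digits.length digits
  permutations.foldl
    (fun int_list ele =>
      int_list ++ [pyIntOf (ele.foldl (fun num_str digit => num_str ++ [digit]) [])]) []

-- ===== PORT B =====
-- perms(rest): [''] for '', else [rest[i] + t for i in range(len(rest))
--   for t in perms(rest[:i] + rest[i+1:])]; fuel = rest length.
def pvPermsB : Nat → List Char → List (List Char)
  | _, [] => [[]]
  | 0, _ => [[]]
  | n + 1, rest =>
      (List.range rest.length).flatMap
        (fun i => (pvPermsB n (rest.take i ++ rest.drop (i + 1))).map (rest.getD i ' ' :: ·))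

-- top level: [int(s[i] + t) for i in range(len(s)) for t in perms(s[:i] + s[i+1:])]
def get_permutation_list_alt (num : Int) : List Int :=
  let s := PySem.Int.toChars num
  (List.range s.length).flatMap
    (fun i =>
      let r := s.take i ++ s.drop (i + 1)
      (pvPermsB r.length r).map (fun t => pyIntOf (s.getD i ' ' :: t)))

-- ===== PRECONDITION & SPEC =====
-- Pre_ excludes negative num: there str(num) contains '-', a permutation puts it after
-- a digit and int() raises ValueError in A (B raises the same way).
def Pre_get_permutation_list (num : Int) : Prop := 0 ≤ num
instance (num : Int) : Decidable (Pre_get_permutation_list num) := by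
  unfold Pre_get_permutation_list; infer_instance

def pvWitness_get_permutation_list : Int := 112

def Spec_get_permutation_list (num : Int) (out : List Int) : Prop := out = get_permutation_list_alt num
instance (num : Int) (out : List Int) : Decidable (Spec_get_permutation_list num out) := by unfold Spec_get_permutation_list; infer_instance

-- ===== CLAIM (what is proved, stated in full; the proofs are below) =====
def Claim_equal_get_permutation_list : Prop := ∀ (num : Int), Dom_get_permutation_list num → Pre_get_permutation_list num → Spec_get_permutation_list num (get_permutation_list num)

-- ===== LEMMAS AND PROOFS =====

-- str(num) is never the empty string
theorem toDigitsCore_ne_nil (b f n : Nat) (l : List Char) (h : l ≠ [] ∨ 0 < f) :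
    Nat.toDigitsCore b f n l ≠ [] := by
  induction f generalizing n l with
  | zero => simp [Nat.toDigitsCore]; tauto
  | succ f ih =>
    simp only [Nat.toDigitsCore]
    split
    · simp
    · exact ih _ _ (Or.inl (by simp))

theorem toChars_ne_nil (n : Int) : PySem.Int.toChars n ≠ [] := by
  unfold PySem.Int.toChars Nat.toDigits
  split
  · simp
  · exact toDigitsCore_ne_nil _ _ _ _ (Or.inr (by omega))

-- pvPicks as an index-indexed map (bridges B's index loop to A's pick list).
theorem pvPicks_eq_range (l : List Char) :
    pvPicks l = (List.range l.length).map
      (fun i => (l.getD i ' ', l.take i ++ l.drop (i + 1))) := by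
  induction l with
  | nil => simp [pvPicks]
  | cons c cs ih =>
    simp [pvPicks, ih, List.range_succ_eq_map, List.map_map, Function.comp_def]

theorem pvPermsB_eq : ∀ (n : Nat) (rest : List Char), pvPermsB n rest = pvPerms n rest := by
  intro n
  induction n with
  | zero => intro rest; cases rest <;> rfl
  | succ n ih =>
    intro rest
    cases rest with
    | nil => rfl
    | cons c cs =>
      show (List.range (c :: cs).length).flatMap _
          = (pvPicks (c :: cs)).flatMap (fun p => (pvPerms n p.2).map (p.1 :: ·))
      rw [pvPicks_eq_range, List.flatMap_map]
      simp only [ih]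

theorem foldl_snoc_eq_map (f : List Char → Int) :
    ∀ (l : List (List Char)) (acc : List Int),
      l.foldl (fun a e => a ++ [f e]) acc = acc ++ l.map f := by
  intro l
  induction l with
  | nil => simp
  | cons e l ih => intro acc; simp [ih, List.append_assoc]

theorem foldl_snoc_id : ∀ (l acc : List Char),
    l.foldl (fun a d => a ++ [d]) acc = acc ++ l := by
  intro l
  induction l with
  | nil => simp
  | cons d l ih => intro acc; simp [ih]

theorem perms_map_eq (s : List Char) (hs : s ≠ []) :
    (pvPerms s.length s).map pyIntOf
      = (List.range s.length).flatMap
          (fun i =>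
            let r := s.take i ++ s.drop (i + 1)
            (pvPermsB r.length r).map (fun t => pyIntOf (s.getD i ' ' :: t))) := by
  cases s with
  | nil => exact absurd rfl hs
  | cons c cs =>
    show ((pvPicks (c :: cs)).flatMap (fun p => (pvPerms cs.length p.2).map (p.1 :: ·))).map pyIntOf = _
    rw [List.map_flatMap, pvPicks_eq_range, List.flatMap_map]
    apply List.flatMap_congr
    intro i hi
    have hi' : i < cs.length + 1 := by simpa using hi
    have hlen : ((c :: cs).take i ++ (c :: cs).drop (i + 1)).length = cs.length := by
      simp only [List.length_append, List.length_take, List.length_drop, List.length_cons]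
      omega
    simp only [pvPermsB_eq, hlen, List.map_map, Function.comp_def]

theorem get_permutation_list_eq (num : Int) :
    get_permutation_list num = get_permutation_list_alt num := by
  show (pvPerms _ _).foldl _ [] = (List.range _).flatMap _
  rw [foldl_snoc_eq_map]
  simp only [List.nil_append]
  rw [show (fun ele : List Char => pyIntOf (ele.foldl (fun a d => a ++ [d]) []))
        = pyIntOf from funext fun ele => by rw [foldl_snoc_id]; simp]
  exact perms_map_eq _ (toChars_ne_nil num)

-- ===== VERDICT (by name: the statement is the Claim_ definition above) =====
theorem get_permutation_list_spec : Claim_equal_get_permutation_list := by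
  intro num _ _
  exact get_permutation_list_eq num
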